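-- pv_equiv track=rewrite | github.com/LeoImmanuel/Python_Projects | Python_Programs/check_frequency_dict.py | get_dict_frequency
-- ===== SOURCE A (Python) =====
-- def get_dict_frequency(dict_items:dict)->dict:
--     dict_frequency = {}
--     for val in dict_items.values():
--         if val not in dict_frequency:
--             dict_frequency[val] = 1
--         else:
--             dict_frequency[val] += 1
--     return dict_frequency
-- ===== SOURCE B (Python) =====
-- def get_dict_frequency(dict_items: dict) -> dict:
--     vals = list(dict_items.values())
--     pairs = []
--     while vals:
--         v = vals[0]
--         pairs.append((v, vals.count(v)))
--         vals = [x for x in vals if x != v]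
--     return dict(pairs)
-- ===== Notes on version B (the rewrite author's own statement) =====
-- stated objective: alternative
-- what changed: Instead of one accumulating dict pass that increments a counter per value, B repeatedly peels off the first remaining value, records it with its count, and filters all its occurrences out, recursing on the strictly shorter remainder; the pair list is turned into a dict at the end.
import Mathlib
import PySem

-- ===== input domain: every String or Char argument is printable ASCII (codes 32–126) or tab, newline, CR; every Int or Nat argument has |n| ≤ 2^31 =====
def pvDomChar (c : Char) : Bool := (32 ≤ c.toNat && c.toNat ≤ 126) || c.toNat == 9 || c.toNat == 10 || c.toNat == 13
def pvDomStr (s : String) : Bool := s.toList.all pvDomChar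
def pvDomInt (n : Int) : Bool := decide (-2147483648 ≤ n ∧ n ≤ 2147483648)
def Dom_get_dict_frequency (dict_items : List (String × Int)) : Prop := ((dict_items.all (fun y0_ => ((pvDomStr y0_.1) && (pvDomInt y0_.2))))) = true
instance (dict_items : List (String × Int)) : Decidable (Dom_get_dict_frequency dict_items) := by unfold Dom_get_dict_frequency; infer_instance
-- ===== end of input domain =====

-- B peels distinct values off the front: record (first value, its count), filter it out, recurse
-- on the strictly shorter remainder, then turn the pair list into a dict — instead of A's single
-- accumulating counter pass; an alternative decomposition, not claimed faster.


-- ===== PORT A =====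
-- for val in dict_items.values(): if val not in dict_frequency: d[val] = 1 else: d[val] += 1
def get_dict_frequency (dict_items : List (String × Int)) : List (Int × Int) :=
  ((dict_items.map (·.2)).foldl
    (fun d v => if d.contains v = false then d.insert v 1 else d.modify v 0 (· + 1))
    PySem.Dict.empty).items

-- ===== PORT B =====
-- while vals: v = vals[0]; pairs.append((v, vals.count(v))); vals = [x for x in vals if x != v]
def freqPairs : List Int → List (Int × Int)
  | [] => []
  | v :: rest =>
      (v, ((v :: rest).count v : Int)) :: freqPairs (rest.filter (fun x => x ≠ v))
termination_by l => l.length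
decreasing_by
  simp only [List.length_cons]
  exact Nat.lt_succ_of_le (by simpa using List.length_filter_le _ rest.attach)

-- return dict(pairs)
def get_dict_frequency_alt (dict_items : List (String × Int)) : List (Int × Int) :=
  (PySem.Dict.ofList (freqPairs (dict_items.map (·.2)))).items

-- ===== PRECONDITION & SPEC =====
def Spec_get_dict_frequency (dict_items : List (String × Int)) (out : List (Int × Int)) : Prop := out = get_dict_frequency_alt dict_items
instance (dict_items : List (String × Int)) (out : List (Int × Int)) : Decidable (Spec_get_dict_frequency dict_items out) := by unfold Spec_get_dict_frequency; infer_instance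

-- ===== CLAIM (what is proved, stated in full; the proofs are below) =====
def Claim_equal_get_dict_frequency : Prop := ∀ (dict_items : List (String × Int)), Dom_get_dict_frequency dict_items → Spec_get_dict_frequency dict_items (get_dict_frequency dict_items)

-- ===== LEMMAS AND PROOFS =====

-- A's branching step is extensionally Counter's step: on a missing key, modify with default 0 inserts 0+1 = 1.
theorem stepA_eq_counter_step (d : PySem.Dict Int Int) (v : Int) :
    (if d.contains v = false then d.insert v 1 else d.modify v 0 (· + 1))
      = d.modify v 0 (· + 1) := by
  by_cases h : d.contains v = false
  · simp [h, PySem.Dict.modify, PySem.Dict.getD_of_not_contains d 0 h]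
  · simp [h]

-- Hence A's fold is collections.Counter of the values.
theorem fold_eq_counter (vals : List Int) :
    vals.foldl
      (fun d v => if d.contains v = false then d.insert v 1 else d.modify v 0 (· + 1))
      PySem.Dict.empty = PySem.Dict.counter vals := by
  rw [PySem.Dict.counter_eq_foldl]
  congr 1
  exact funext fun d => funext fun v => stepA_eq_counter_step d v

-- ofList commutes with filter.
theorem ofList_filter (p : Int → Bool) (l : List Int) :
    PySem.Set.ofList (l.filter p) = (PySem.Set.ofList l).filter p := by
  induction l with
  | nil => simp [PySem.Set.ofList_nil]
  | cons x xs ih =>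
    by_cases hp : p x = true
    · simp only [List.filter_cons, hp, if_true, PySem.Set.ofList_cons, ih, PySem.Set.discard,
        List.filter_filter]
      exact congrArg _ (List.filter_congr fun a _ => Bool.and_comm _ _)
    · have hp' : p x = false := by revert hp; cases p x <;> simp
      simp only [List.filter_cons, hp', if_false, PySem.Set.ofList_cons, PySem.Set.discard,
        List.filter_filter, Bool.false_eq_true]
      rw [ih]
      refine List.filter_congr fun a _ => ?_
      by_cases hax : a = x
      · subst hax; simp [hp']
      · simp [hax]

-- peeling the first value and filtering it out enumerates the distinct values in
-- first-occurrence order, each paired with its count in the original list.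
theorem freqPairs_eq_aux (n : Nat) : ∀ (l : List Int), l.length ≤ n →
    freqPairs l = (PySem.Set.ofList l).map (fun k => (k, (l.count k : Int))) := by
  induction n with
  | zero =>
    intro l hl
    have : l = [] := List.eq_nil_of_length_eq_zero (Nat.le_zero.mp hl)
    subst this
    simp [freqPairs, PySem.Set.ofList_nil]
  | succ n ihn =>
    intro l hl
    match l with
    | [] => simp [freqPairs, PySem.Set.ofList_nil]
    | v :: rest =>
      have hlen : (rest.filter (fun x => decide (x ≠ v))).length ≤ n :=
        le_trans (List.length_filter_le _ _) (Nat.le_of_succ_le_succ hl)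
      rw [freqPairs, ihn _ hlen, PySem.Set.ofList_cons, List.map_cons, ofList_filter]
      have hL : List.filter (fun x => decide (x ≠ v)) (PySem.Set.ofList rest)
          = (PySem.Set.ofList rest).discard v := by
        simp only [PySem.Set.discard]
        refine List.filter_congr fun a _ => ?_
        by_cases hav : a = v
        · subst hav; simp
        · simp [hav]
      rw [hL]
      refine congrArg _ (List.map_congr_left (fun k hk => ?_))
      have hkv : k ≠ v :=
        ((PySem.Set.mem_discard (s := PySem.Set.ofList rest) (x := v) (y := k)).mp hk).2
      have h1 : (rest.filter (fun x => decide (x ≠ v))).count k = rest.count k := by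
        rw [List.count_filter]
        simp [hkv]
      have h2 : (v :: rest).count k = rest.count k :=
        List.count_cons_of_ne (Ne.symm hkv)
      rw [h1, h2]

theorem freqPairs_eq (l : List Int) :
    freqPairs l = (PySem.Set.ofList l).map (fun k => (k, (l.count k : Int))) :=
  freqPairs_eq_aux l.length l le_rfl

-- dict(pairs) on a nodup-key pair list returns the pairs unchanged.
theorem items_ofList_nodup (pairs : List (Int × Int)) (h : (pairs.map (·.1)).Nodup) :
    (PySem.Dict.ofList pairs).items = pairs := by
  have h2 := PySem.Dict.items_foldl_insert_fresh
    (d := (PySem.Dict.empty : PySem.Dict Int Int)) (l := pairs)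
    (k := fun p => p.1) (v := fun p => p.2)
    (by intro a _; simp) (by simpa using h)
  simpa using h2

-- ===== VERDICT (by name: the statement is the Claim_ definition above) =====
theorem get_dict_frequency_spec : Claim_equal_get_dict_frequency := by
  intro dict_items _
  show get_dict_frequency dict_items = get_dict_frequency_alt dict_items
  unfold get_dict_frequency get_dict_frequency_alt
  rw [fold_eq_counter (dict_items.map (·.2)), PySem.Dict.items_counter,
    freqPairs_eq, items_ofList_nodup]
  rw [List.map_map]
  have hg : ((fun (x : Int × Int) => x.1) ∘ fun k => (k, (((dict_items.map (fun x => x.2)).count k : Int))))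
      = id := by funext k; rfl
  rw [hg, List.map_id]
  exact PySem.Set.nodup_ofList _
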